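-- pv_equiv track=rewrite | github.com/TsunamiTito/adventOfCode2024 | Day10/hoof_it.py | find_trail_head
-- ===== SOURCE A (Python) =====
-- def find_trail_head(map):
--     x = 0
--     y = 0
--     for row in map:
--         for spot in row:
--             if spot == 0:
--                 target = [x, y]
--             y += 1
--         x += 1
--         y = 0
--
--     return target
-- ===== SOURCE B (Python) =====
-- def find_trail_head(map):
--     for i in range(len(map) - 1, -1, -1):
--         row = map[i]
--         for j in range(len(row) - 1, -1, -1):
--             if row[j] == 0:
--                 return [i, j]
--     raise ValueError("no trail head in map")
-- ===== Notes on version B (the rewrite author's own statement) =====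
-- stated objective: alternative
-- what changed: A scans the whole grid forward keeping the last zero seen in an accumulator; B scans rows and columns in reverse and returns immediately on the first zero found, with no accumulator and no full pass.
import Mathlib
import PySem

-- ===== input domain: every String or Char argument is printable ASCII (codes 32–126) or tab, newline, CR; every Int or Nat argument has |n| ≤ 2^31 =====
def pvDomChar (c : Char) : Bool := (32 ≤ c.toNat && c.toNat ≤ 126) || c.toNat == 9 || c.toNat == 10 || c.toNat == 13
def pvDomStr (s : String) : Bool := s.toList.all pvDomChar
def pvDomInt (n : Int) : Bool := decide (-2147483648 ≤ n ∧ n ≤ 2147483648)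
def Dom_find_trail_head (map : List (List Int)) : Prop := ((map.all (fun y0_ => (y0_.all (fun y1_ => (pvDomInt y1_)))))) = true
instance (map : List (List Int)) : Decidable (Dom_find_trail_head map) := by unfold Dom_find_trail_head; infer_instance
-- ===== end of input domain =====

-- B replaces A's forward accumulator scan by a reverse scan with early exit; return value only.
-- ===== PORT A =====
def find_trail_head (map : List (List Int)) : List Int :=
  let st := map.foldl
    (fun (st : Int × Int × Option (List Int)) row =>
      let inner := row.foldl
        (fun (p : Int × Option (List Int)) spot =>
          (p.1 + 1, if spot = 0 then some [st.1, p.1] else p.2))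
        (st.2.1, st.2.2)
      (st.1 + 1, 0, inner.2))
    (0, 0, none)
  -- Python raises UnboundLocalError when no zero exists; those inputs are excluded by Pre_
  (st.2.2).getD []

-- ===== PORT B =====
-- reverse scan of one row: index of the LAST zero (checks the tail, i.e. later columns, first)
def pvLastZeroCol : List Int → Option Int
  | [] => none
  | a :: rest =>
    match pvLastZeroCol rest with
    | some j => some (j + 1)
    | none => if a = 0 then some 0 else none

-- reverse scan of the rows: later rows are examined first; early exit on a hit
def pvLastZeroPos : List (List Int) → Option (Int × Int)
  | [] => none
  | row :: rest =>
    match pvLastZeroPos rest with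
    | some (i, j) => some (i + 1, j)
    | none =>
      match pvLastZeroCol row with
      | some j => some (0, j)
      | none => none

def find_trail_head_alt (map : List (List Int)) : List Int :=
  match pvLastZeroPos map with
  | some (i, j) => [i, j]
  -- Python B raises ValueError here; those inputs are excluded by Pre_
  | none => []

-- ===== PRECONDITION & SPEC =====
-- Pre_ excludes grids containing no zero: there Python A raises UnboundLocalError (no value).
def Pre_find_trail_head (map : List (List Int)) : Prop := ∃ row ∈ map, (0 : Int) ∈ row
instance (map : List (List Int)) : Decidable (Pre_find_trail_head map) := by unfold Pre_find_trail_head; infer_instance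
def pvWitness_find_trail_head : List (List Int) := [[1, 0], [2]]
def Spec_find_trail_head (map : List (List Int)) (out : List Int) : Prop := out = find_trail_head_alt map
instance (map : List (List Int)) (out : List Int) : Decidable (Spec_find_trail_head map out) := by unfold Spec_find_trail_head; infer_instance

-- ===== CLAIM (what is proved, stated in full; the proofs are below) =====
def Claim_equal_find_trail_head : Prop := ∀ (map : List (List Int)), Dom_find_trail_head map → Pre_find_trail_head map → Spec_find_trail_head map (find_trail_head map)

-- ===== LEMMAS AND PROOFS =====

-- inner fold of A on one row, from arbitrary start state
theorem pv_inner (x : Int) (row : List Int) (y0 : Int) (t0 : Option (List Int)) :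
    row.foldl (fun (p : Int × Option (List Int)) spot =>
        (p.1 + 1, if spot = 0 then some [x, p.1] else p.2)) (y0, t0)
      = (y0 + row.length,
         match pvLastZeroCol row with
         | some j => some [x, y0 + j]
         | none => t0) := by
  induction row generalizing y0 t0 with
  | nil => simp [pvLastZeroCol]
  | cons a rest ih =>
    simp only [List.foldl_cons, ih, pvLastZeroCol]
    cases h : pvLastZeroCol rest with
    | some j => simp; constructor <;> [omega; ring_nf]
    | none =>
      by_cases ha : a = 0 <;> simp [ha] <;> omega

-- outer fold of A from arbitrary start state
theorem pv_outer (m : List (List Int)) (x0 : Int) (t0 : Option (List Int)) :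
    m.foldl (fun (st : Int × Int × Option (List Int)) row =>
        let inner := row.foldl
          (fun (p : Int × Option (List Int)) spot =>
            (p.1 + 1, if spot = 0 then some [st.1, p.1] else p.2))
          (st.2.1, st.2.2)
        (st.1 + 1, 0, inner.2)) (x0, 0, t0)
      = (x0 + m.length, 0,
         match pvLastZeroPos m with
         | some (i, j) => some [x0 + i, j]
         | none => t0) := by
  induction m generalizing x0 t0 with
  | nil => simp [pvLastZeroPos]
  | cons row rest ih =>
    rw [List.foldl_cons, ih, pv_inner]
    simp only [pvLastZeroPos]
    cases h : pvLastZeroPos rest with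
    | some p =>
      obtain ⟨i, j⟩ := p
      simp; constructor <;> [omega; ring_nf]
    | none =>
      cases hc : pvLastZeroCol row <;> simp <;> omega

theorem pv_eq (map : List (List Int)) : find_trail_head map = find_trail_head_alt map := by
  unfold find_trail_head find_trail_head_alt
  rw [pv_outer]
  cases h : pvLastZeroPos map with
  | some p => obtain ⟨i, j⟩ := p; simp
  | none => simp

-- ===== VERDICT (by name: the statement is the Claim_ definition above) =====
theorem find_trail_head_spec : Claim_equal_find_trail_head := by
  intro map _ _
  unfold Spec_find_trail_head
  exact pv_eq map
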